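-- pv_equiv track=rewrite | github.com/kejrak/advent-of-code | 2024/python/main.py | count_ways_to_form_word
-- ===== SOURCE A (Python) =====
-- def count_ways_to_form_word(word, available_words, memo):
--     if word in memo:
--         return memo[word]
--
--     if word == "":
--         return 1
--
--     total_ways = 0
--
--     for w in sorted(available_words, key=len, reverse=True):
--         if word.startswith(w):
--             remaining_word = word[len(w):]
--             total_ways += count_ways_to_form_word(remaining_word, available_words, memo)
--
--     memo[word] = total_ways
--     return total_ways
-- ===== SOURCE B (Python) =====
-- def count_ways_to_form_word(word, available_words, memo):
--     n = len(word)
--     ways = [0] * (n + 1)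
--     for i in range(n, -1, -1):
--         suffix = word[i:]
--         if suffix in memo:
--             ways[i] = memo[suffix]
--         elif i == n:
--             ways[i] = 1
--         else:
--             ways[i] = sum(ways[i + len(w)] for w in available_words
--                           if suffix.startswith(w))
--     return ways[0]
-- ===== Notes on version B (the rewrite author's own statement) =====
-- stated objective: faster
-- what changed: Replaces A's top-down memoized recursion that re-sorts available_words on every call with a single bottom-up DP pass over the suffixes of word (table ways[i] = count for word[i:]), consulting the caller's memo per suffix and never sorting; B does not mutate memo while A inserts computed entries into it (return values agree).
import Mathlib
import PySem

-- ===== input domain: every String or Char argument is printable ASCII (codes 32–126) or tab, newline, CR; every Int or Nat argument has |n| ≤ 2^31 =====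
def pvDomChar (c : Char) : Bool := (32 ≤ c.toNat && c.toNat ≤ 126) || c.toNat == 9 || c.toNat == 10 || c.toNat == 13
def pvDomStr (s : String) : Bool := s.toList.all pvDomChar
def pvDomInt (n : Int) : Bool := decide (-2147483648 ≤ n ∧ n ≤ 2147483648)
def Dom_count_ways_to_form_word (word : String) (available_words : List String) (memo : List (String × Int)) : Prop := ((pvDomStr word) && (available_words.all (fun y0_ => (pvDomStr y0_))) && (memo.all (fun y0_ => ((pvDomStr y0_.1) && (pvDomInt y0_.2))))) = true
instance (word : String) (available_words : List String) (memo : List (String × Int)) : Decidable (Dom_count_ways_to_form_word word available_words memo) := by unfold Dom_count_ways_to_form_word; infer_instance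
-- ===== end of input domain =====

-- ===== PORT A =====
-- B changes the algorithm (bottom-up suffix DP, no sorting, no memo mutation) for speed;
-- A mutates `memo` in place (inserts computed entries) while B does not: the equivalence
-- proved here is about the RETURN value only.
-- Fuel-based totalisation of A's recursion: `word.toList.length + 1` calls suffice on every
-- input Pre_ admits (each recursive call strictly shortens the word); fuel 0 is unreachable there.
def aGo (available_words : List String) : Nat → String → PySem.Dict String Int → Int × PySem.Dict String Int
  | 0, _, d => (0, d)
  | Nat.succ k, word, d =>
    match d.get? word with
    | some v => (v, d)
    | none =>
      if word = "" then (1, d)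
      else
        let p := (PySem.List.sorted available_words (fun w => PySem.Str.len w) true).foldl
          (fun (acc : Int × PySem.Dict String Int) w =>
            if PySem.Str.startswith word w then
              let r := aGo available_words k (PySem.Str.slice word (some (PySem.Str.len w)) none) acc.2
              (acc.1 + r.1, r.2)
            else acc) (0, d)
        (p.1, p.2.insert word p.1)

def count_ways_to_form_word (word : String) (available_words : List String) (memo : List (String × Int)) : Int :=
  (aGo available_words (word.toList.length + 1) word (PySem.Dict.ofList memo)).1

-- ===== PORT B =====
def count_ways_to_form_word_alt (word : String) (available_words : List String) (memo : List (String × Int)) : Int :=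
  let d := PySem.Dict.ofList memo
  let n : Int := PySem.Str.len word
  let ways0 : List Int := List.replicate (n.toNat + 1) 0
  let ways := (PySem.List.pyRange n (-1) (-1)).foldl (fun ways i =>
    let suffix := PySem.Str.slice word (some i) none
    let v : Int :=
      match d.get? suffix with
      | some v => v
      | none =>
        if i = n then 1
        else available_words.foldl
          (fun acc w =>
            if PySem.Str.startswith suffix w then
              acc + PySem.List.pyGetD ways (i + PySem.Str.len w) 0
            else acc) 0
    PySem.List.pySetD ways i v) ways0
  PySem.List.pyGetD ways 0 0

-- ===== PRECONDITION & SPEC =====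
-- Pre_ excludes exactly the inputs on which Python A raises (RecursionError): the empty
-- string among available_words with word neither empty nor a key of memo makes A recurse
-- on word forever.  A returns normally on every other input.
def Pre_count_ways_to_form_word (word : String) (available_words : List String) (memo : List (String × Int)) : Prop :=
  "" ∈ available_words → (word = "" ∨ (PySem.Dict.ofList memo).contains word = true)
instance (word : String) (available_words : List String) (memo : List (String × Int)) : Decidable (Pre_count_ways_to_form_word word available_words memo) := by unfold Pre_count_ways_to_form_word; infer_instance

def pvWitness_count_ways_to_form_word : String × List String × (List (String × Int)) :=
  ("ab", ["a", "b"], [("b", 1)])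

def Spec_count_ways_to_form_word (word : String) (available_words : List String) (memo : List (String × Int)) (out : Int) : Prop := out = count_ways_to_form_word_alt word available_words memo
instance (word : String) (available_words : List String) (memo : List (String × Int)) (out : Int) : Decidable (Spec_count_ways_to_form_word word available_words memo out) := by unfold Spec_count_ways_to_form_word; infer_instance

-- ===== CLAIM (what is proved, stated in full; the proofs are below) =====
def Claim_equal_count_ways_to_form_word : Prop := ∀ (word : String) (available_words : List String) (memo : List (String × Int)), Dom_count_ways_to_form_word word available_words memo → Pre_count_ways_to_form_word word available_words memo → Spec_count_ways_to_form_word word available_words memo (count_ways_to_form_word word available_words memo)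

-- ===== LEMMAS AND PROOFS =====

-- `sdrop s k` = the suffix of `s` from position `k` (word[k:])
def sdrop (s : String) (k : Nat) : String := String.ofList (s.toList.drop k)

-- Reference value: the pure recursion behind A (fuelled), relative to the ORIGINAL memo d0.
def FF (aw : List String) (d0 : PySem.Dict String Int) : Nat → String → Int
  | 0, _ => 0
  | (k+1), s =>
    match d0.get? s with
    | some v => v
    | none =>
      if s = "" then 1
      else aw.foldl (fun acc w =>
        if PySem.Str.startswith s w then acc + FF aw d0 k (sdrop s w.toList.length) else acc) 0

def FFs (aw : List String) (d0 : PySem.Dict String Int) (s : String) : Int :=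
  FF aw d0 (s.toList.length + 1) s

theorem startswith_true_iff (s w : String) :
    PySem.Str.startswith s w = true ↔ w.toList <+: s.toList := by
  rw [PySem.Str.startswith_eq]; exact PySem.Chars.startswith_iff _ _

theorem toList_sdrop (s : String) (k : Nat) : (sdrop s k).toList = s.toList.drop k := by
  simp [sdrop]

theorem len_sdrop_lt (s w : String) (hp : w.toList <+: s.toList) (hne : w ≠ "") :
    (sdrop s w.toList.length).toList.length < s.toList.length := by
  have h1 : w.toList.length ≤ s.toList.length := hp.length_le
  have h2 : w.toList ≠ [] := by
    intro h; exact hne (by rwa [← String.toList_eq_nil_iff])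
  have h3 : 0 < w.toList.length := List.length_pos_iff.mpr h2
  rw [toList_sdrop, List.length_drop]
  omega

theorem slice_from_nat (s : String) (k : Nat) :
    PySem.Str.slice s (some (k : Int)) none = sdrop s k := by
  have h : (PySem.Str.slice s (some (k : Int)) none).toList = (sdrop s k).toList := by
    rw [PySem.Str.toList_slice, toList_sdrop, PySem.Chars.slice_eq_listSlice,
      PySem.List.slice_from_natCast]
  calc PySem.Str.slice s (some (k : Int)) none
      = String.ofList (PySem.Str.slice s (some (k : Int)) none).toList := String.ofList_toList.symm
    _ = String.ofList (sdrop s k).toList := by rw [h]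
    _ = sdrop s k := String.ofList_toList

theorem str_len_eq (w : String) : PySem.Str.len w = (w.toList.length : Int) := by
  simp [PySem.Str.len]

theorem FF_irrel (aw : List String) (d0 : PySem.Dict String Int) (h0 : "" ∉ aw) :
    ∀ (n : Nat) (s : String), s.toList.length ≤ n → ∀ k1 k2, s.toList.length < k1 → s.toList.length < k2 →
      FF aw d0 k1 s = FF aw d0 k2 s := by
  intro n
  induction n with
  | zero =>
    intro s hs k1 k2 h1 h2
    have hs0 : s = "" := by
      rw [← String.toList_eq_nil_iff]
      exact List.length_eq_zero_iff.mp (Nat.le_zero.mp hs)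
    obtain ⟨a, rfl⟩ : ∃ a, k1 = a + 1 := ⟨k1 - 1, by omega⟩
    obtain ⟨b, rfl⟩ : ∃ b, k2 = b + 1 := ⟨k2 - 1, by omega⟩
    subst hs0
    cases hd : d0.get? "" <;> simp [FF, hd]
  | succ n ih =>
    intro s hs k1 k2 h1 h2
    obtain ⟨a, rfl⟩ : ∃ a, k1 = a + 1 := ⟨k1 - 1, by omega⟩
    obtain ⟨b, rfl⟩ : ∃ b, k2 = b + 1 := ⟨k2 - 1, by omega⟩
    cases hd : d0.get? s with
    | some v => simp [FF, hd]
    | none =>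
      by_cases hs0 : s = ""
      · subst hs0; simp [FF, hd]
      · simp only [FF, hd, if_neg hs0]
        apply PySem.List.foldl_congr_mem
        intro acc w hw
        by_cases hsw : PySem.Str.startswith s w = true
        · simp only [hsw, if_pos]
          have hp : w.toList <+: s.toList := (startswith_true_iff s w).mp hsw
          have hwne : w ≠ "" := by intro h; exact h0 (h ▸ hw)
          have hlt := len_sdrop_lt s w hp hwne
          rw [ih (sdrop s w.toList.length) (by omega) a b (by omega) (by omega)]
        · rw [if_neg hsw, if_neg hsw]

theorem FFs_unfold (aw : List String) (d0 : PySem.Dict String Int) (h0 : "" ∉ aw)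
    (s : String) (hd : d0.get? s = none) (hs : s ≠ "") :
    FFs aw d0 s = aw.foldl (fun acc w =>
      if PySem.Str.startswith s w then acc + FFs aw d0 (sdrop s w.toList.length) else acc) 0 := by
  have h1 : FFs aw d0 s = aw.foldl (fun acc w =>
      if PySem.Str.startswith s w then acc + FF aw d0 s.toList.length (sdrop s w.toList.length) else acc) 0 := by
    unfold FFs
    simp only [FF, hd, if_neg hs]
  rw [h1]
  apply PySem.List.foldl_congr_mem
  intro acc w hw
  by_cases hsw : PySem.Str.startswith s w = true
  · rw [if_pos hsw, if_pos hsw]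
    have hp : w.toList <+: s.toList := (startswith_true_iff s w).mp hsw
    have hwne : w ≠ "" := by intro h; exact h0 (h ▸ hw)
    have hlt := len_sdrop_lt s w hp hwne
    have he : FF aw d0 s.toList.length (sdrop s w.toList.length) = FFs aw d0 (sdrop s w.toList.length) :=
      FF_irrel aw d0 h0 (sdrop s w.toList.length).toList.length (sdrop s w.toList.length) (le_refl _) _ _ (by omega) (by omega)
    rw [he]
  · rw [if_neg hsw, if_neg hsw]

-- A-side invariant on the evolving memo dict
def InvA (aw : List String) (d0 d : PySem.Dict String Int) : Prop :=
  (∀ s, (d0.get? s).isSome → d.get? s = d0.get? s) ∧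
  (∀ s v, d.get? s = some v → v = FFs aw d0 s)

theorem A_main (aw : List String) (d0 : PySem.Dict String Int) (h0 : "" ∉ aw) :
    ∀ (fuel : Nat) (s : String) (d : PySem.Dict String Int),
      s.toList.length < fuel → InvA aw d0 d →
      (aGo aw fuel s d).1 = FFs aw d0 s ∧ InvA aw d0 (aGo aw fuel s d).2 := by
  intro fuel
  induction fuel with
  | zero => intro s d h _; omega
  | succ k ih =>
    intro s d h hInv
    cases hd : d.get? s with
    | some v =>
      refine ⟨?_, ?_⟩ <;> simp only [aGo, hd]
      · exact (hInv.2 s v hd)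
      · exact hInv
    | none =>
      have hd0 : d0.get? s = none := by
        cases hg : d0.get? s with
        | none => rfl
        | some u =>
          have h1 := hInv.1 s (by simp [hg])
          rw [hg, hd] at h1; exact absurd h1 (by simp)
      by_cases hs : s = ""
      · subst hs
        refine ⟨?_, ?_⟩ <;> simp only [aGo, hd]
        · unfold FFs; simp [FF, hd0]
        · exact hInv
      · have hloop : ∀ (L : List String), (∀ w ∈ L, w ∈ aw) →
            ∀ (acc : Int) (dd : PySem.Dict String Int), InvA aw d0 dd →
            (L.foldl (fun (acc : Int × PySem.Dict String Int) w =>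
              if PySem.Str.startswith s w then
                let r := aGo aw k (PySem.Str.slice s (some (PySem.Str.len w)) none) acc.2
                (acc.1 + r.1, r.2)
              else acc) (acc, dd)).1
              = L.foldl (fun a w => if PySem.Str.startswith s w then a + FFs aw d0 (sdrop s w.toList.length) else a) acc
            ∧ InvA aw d0 (L.foldl (fun (acc : Int × PySem.Dict String Int) w =>
              if PySem.Str.startswith s w then
                let r := aGo aw k (PySem.Str.slice s (some (PySem.Str.len w)) none) acc.2
                (acc.1 + r.1, r.2)
              else acc) (acc, dd)).2 := by
          intro L
          induction L with
          | nil => intro _ acc dd hInvD; exact ⟨rfl, hInvD⟩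
          | cons w L ihL =>
            intro hmem acc dd hInvD
            by_cases hsw : PySem.Str.startswith s w = true
            · have hp := (startswith_true_iff s w).mp hsw
              have hwne : w ≠ "" := fun hh => h0 (hh ▸ hmem w (List.mem_cons_self))
              have hlt := len_sdrop_lt s w hp hwne
              have hslice : PySem.Str.slice s (some (PySem.Str.len w)) none = sdrop s w.toList.length := by
                rw [str_len_eq]; exact slice_from_nat s _
              have hrec := ih (sdrop s w.toList.length) dd (by omega) hInvD
              simp only [List.foldl_cons, if_pos hsw, hslice]
              obtain ⟨hv, hi⟩ := ihL (fun x hx => hmem x (List.mem_cons_of_mem w hx))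
                (acc + (aGo aw k (sdrop s w.toList.length) dd).1) (aGo aw k (sdrop s w.toList.length) dd).2 hrec.2
              refine ⟨?_, hi⟩
              rw [hv, hrec.1]
            · simp only [List.foldl_cons, if_neg hsw]
              exact ihL (fun x hx => hmem x (List.mem_cons_of_mem w hx)) acc dd hInvD
        have hmemS : ∀ w ∈ PySem.List.sorted aw (fun w => PySem.Str.len w) true, w ∈ aw :=
          fun w hw => (PySem.List.sorted_perm aw (fun w => PySem.Str.len w) true).mem_iff.mp hw
        obtain ⟨hval, hinv2⟩ := hloop (PySem.List.sorted aw (fun w => PySem.Str.len w) true) hmemS 0 d hInv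
        -- the pure fold over the sorted list equals the pure fold over aw (commutativity of +)
        have hsum : ∀ (L : List String),
            L.foldl (fun a w => if PySem.Str.startswith s w then a + FFs aw d0 (sdrop s w.toList.length) else a) (0:Int)
            = (L.map (fun w => if PySem.Str.startswith s w then FFs aw d0 (sdrop s w.toList.length) else 0)).sum := by
          intro L
          rw [PySem.List.foldl_congr_mem L _
            (fun a w => a + (if PySem.Str.startswith s w then FFs aw d0 (sdrop s w.toList.length) else 0)) 0
            (by intro a w _
                dsimp only
                by_cases hx : PySem.Str.startswith s w = true
                · rw [if_pos hx, if_pos hx]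
                · rw [if_neg hx, if_neg hx]; ring)]
          rw [PySem.List.foldl_add]
          ring
        have hperm : (PySem.List.sorted aw (fun w => PySem.Str.len w) true).foldl
              (fun a w => if PySem.Str.startswith s w then a + FFs aw d0 (sdrop s w.toList.length) else a) (0:Int)
            = FFs aw d0 s := by
          rw [hsum, FFs_unfold aw d0 h0 s hd0 hs, hsum]
          exact ((PySem.List.sorted_perm aw (fun w => PySem.Str.len w) true).map _).sum_eq
        refine ⟨?_, ?_⟩ <;> simp only [aGo, hd, if_neg hs]
        · rw [hval, hperm]
        · refine ⟨?_, ?_⟩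
          · intro t ht
            rw [PySem.Dict.get?_insert]
            split
            · next heq => subst heq; rw [hd0] at ht; exact absurd ht (by simp)
            · exact hinv2.1 t ht
          · intro t v hv
            rw [PySem.Dict.get?_insert] at hv
            split at hv
            · next heq =>
              cases hv
              rw [hval, hperm]
              subst heq; rfl
            · exact hinv2.2 t v hv

-- B-side: the body of B's downward loop, exactly as in the port.
def bStep (word : String) (aw : List String) (d : PySem.Dict String Int) (ways : List Int) (i : Int) : List Int :=
  let suffix := PySem.Str.slice word (some i) none
  let v : Int :=
    match d.get? suffix with
    | some v => v
    | none =>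
      if i = PySem.Str.len word then 1
      else aw.foldl
        (fun acc w =>
          if PySem.Str.startswith suffix w then
            acc + PySem.List.pyGetD ways (i + PySem.Str.len w) 0
          else acc) 0
  PySem.List.pySetD ways i v

theorem alt_eq (word : String) (aw : List String) (memo : List (String × Int)) :
    count_ways_to_form_word_alt word aw memo =
      PySem.List.pyGetD
        ((PySem.List.pyRange (PySem.Str.len word) (-1) (-1)).foldl
          (bStep word aw (PySem.Dict.ofList memo))
          (List.replicate ((PySem.Str.len word).toNat + 1) 0)) 0 0 := rfl

theorem bStep_length (word : String) (aw : List String) (d : PySem.Dict String Int) :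
    ∀ (L : List Int) (ways : List Int), (L.foldl (bStep word aw d) ways).length = ways.length := by
  intro L
  induction L with
  | nil => intro ways; rfl
  | cons i L ihL =>
    intro ways
    rw [List.foldl_cons, ihL]
    simp [bStep, PySem.List.length_pySetD]

theorem FFs_memo (aw : List String) (d0 : PySem.Dict String Int) (s : String) (v : Int)
    (hd : d0.get? s = some v) : FFs aw d0 s = v := by
  unfold FFs; simp [FF, hd]

theorem sdrop_full (word : String) : sdrop word word.toList.length = "" := by
  simp [sdrop]

theorem sdrop_zero (word : String) : sdrop word 0 = word := by
  simp [sdrop, String.ofList_toList]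

theorem sdrop_sdrop (word : String) (j k : Nat) : sdrop (sdrop word j) k = sdrop word (j + k) := by
  simp [sdrop, List.drop_drop]

theorem len_sdrop (word : String) (j : Nat) :
    (sdrop word j).toList.length = word.toList.length - j := by
  simp [toList_sdrop]

-- the loop body at a valid index j computes FFs of word[j:]
theorem B_body (word : String) (aw : List String) (d0 : PySem.Dict String Int) (h0 : "" ∉ aw)
    (j : Nat) (hj : j ≤ word.toList.length) (ways : List Int)
    (hlen : ways.length = word.toList.length + 1)
    (habove : ∀ m : Nat, j < m → m ≤ word.toList.length → ways.getD m 0 = FFs aw d0 (sdrop word m)) :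
    bStep word aw d0 ways (j : Int) = ways.set j (FFs aw d0 (sdrop word j)) := by
  have hsuffix : PySem.Str.slice word (some (j : Int)) none = sdrop word j := slice_from_nat word j
  unfold bStep
  rw [hsuffix, PySem.List.pySetD_of_nonneg _ _ (by positivity)]
  simp only [Int.toNat_natCast]
  congr 1
  cases hd : d0.get? (sdrop word j) with
  | some v => exact (FFs_memo aw d0 _ v hd).symm
  | none =>
    simp only
    by_cases hjn : j = word.toList.length
    · subst hjn
      rw [if_pos (by rw [str_len_eq])]
      rw [sdrop_full] at hd ⊢
      unfold FFs; simp [FF, hd]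
    · rw [if_neg (by rw [str_len_eq]; intro hc; exact hjn (by exact_mod_cast hc))]
      have hjlt : j < word.toList.length := lt_of_le_of_ne hj hjn
      have hne : sdrop word j ≠ "" := by
        intro hc
        have h2 : (sdrop word j).toList.length = 0 := by rw [hc]; rfl
        rw [len_sdrop] at h2; omega
      rw [FFs_unfold aw d0 h0 _ hd hne]
      apply (PySem.List.foldl_congr_mem _ _ _ _ _).symm
      intro acc w hw
      dsimp only
      by_cases hsw : PySem.Str.startswith (sdrop word j) w = true
      · rw [if_pos hsw, if_pos hsw]
        have hp : w.toList <+: (sdrop word j).toList := (startswith_true_iff _ w).mp hsw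
        have hwne : w ≠ "" := fun hh => h0 (hh ▸ hw)
        have hw1 : 0 < w.toList.length := by
          cases Nat.eq_zero_or_pos w.toList.length with
          | inl hz =>
            exact absurd (by rw [← String.toList_eq_nil_iff]; exact List.length_eq_zero_iff.mp hz) hwne
          | inr hpos => exact hpos
        have hwle : w.toList.length ≤ word.toList.length - j := by
          have := hp.length_le; rwa [len_sdrop] at this
        have hidx : (j : Int) + PySem.Str.len w = ((j + w.toList.length : Nat) : Int) := by
          rw [str_len_eq]; push_cast; ring
        rw [hidx, PySem.List.pyGetD_natCast]
        rw [habove (j + w.toList.length) (by omega) (by omega), sdrop_sdrop]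
      · rw [if_neg hsw, if_neg hsw]

theorem B_loop (word : String) (aw : List String) (d0 : PySem.Dict String Int) (h0 : "" ∉ aw) :
    ∀ (j : Nat), j ≤ word.toList.length + 1 → ∀ (ways : List Int),
      ways.length = word.toList.length + 1 →
      (∀ m : Nat, j ≤ m → m ≤ word.toList.length → ways.getD m 0 = FFs aw d0 (sdrop word m)) →
      ((PySem.List.pyRange ((j : Int) - 1) (-1) (-1)).foldl (bStep word aw d0) ways).length = word.toList.length + 1 ∧
      ∀ m : Nat, m ≤ word.toList.length →
        ((PySem.List.pyRange ((j : Int) - 1) (-1) (-1)).foldl (bStep word aw d0) ways).getD m 0 = FFs aw d0 (sdrop word m) := by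
  intro j
  induction j with
  | zero =>
    intro _ ways hlen hup
    rw [PySem.List.pyRange_neg_one_eq_nil (by norm_num)]
    exact ⟨hlen, fun m hm => hup m (Nat.zero_le m) hm⟩
  | succ j ihj =>
    intro hj ways hlen hup
    have hcast : ((j + 1 : Nat) : Int) - 1 = (j : Int) := by push_cast; ring
    rw [hcast, PySem.List.pyRange_neg_one_cons (by omega), List.foldl_cons]
    have hbody := B_body word aw d0 h0 j (by omega) ways hlen (fun m hm => hup m (by omega))
    rw [hbody]
    have := ihj (by omega) (ways.set j (FFs aw d0 (sdrop word j)))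
      (by rw [List.length_set]; exact hlen)
      (by intro m hm hmle
          by_cases hmj : m = j
          · subst hmj
            simp [List.getD, show m < ways.length by omega]
          · rw [List.getD, List.getElem?_set_ne (fun hc => hmj (hc.symm)), ← List.getD]
            exact hup m (by omega) hmle)
    exact this

theorem getD_set_zero (xs : List Int) (v : Int) (h : 0 < xs.length) :
    (xs.set 0 v).getD 0 0 = v := by
  simp [List.getD, h]

theorem range_split (N : Nat) :
    PySem.List.pyRange (N : Int) (-1) (-1) = PySem.List.pyRange (N : Int) 0 (-1) ++ [0] := by
  induction N with
  | zero =>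
    rw [show ((0 : Nat) : Int) = 0 by norm_num]
    rw [PySem.List.pyRange_neg_one_cons (by omega), PySem.List.pyRange_neg_one_eq_nil (by omega),
      PySem.List.pyRange_neg_one_eq_nil (by omega)]
    rfl
  | succ N ihN =>
    have hc : ((N + 1 : Nat) : Int) - 1 = (N : Int) := by push_cast; ring
    rw [PySem.List.pyRange_neg_one_cons (show (-1:Int) < ((N+1:Nat):Int) by omega), hc, ihN,
      PySem.List.pyRange_neg_one_cons (show (0:Int) < ((N+1:Nat):Int) by omega), hc]
    rfl

theorem slice_zero (word : String) : PySem.Str.slice word (some (0 : Int)) none = word := by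
  have h := slice_from_nat word 0
  rw [show ((0 : Nat) : Int) = 0 by norm_num] at h
  rw [h, sdrop_zero]

theorem bStep_hit (word : String) (aw : List String) (d : PySem.Dict String Int)
    (W : List Int) (v : Int) (hget : d.get? word = some v) (hW : 0 < W.length) :
    PySem.List.pyGetD (bStep word aw d W 0) 0 0 = v := by
  unfold bStep
  rw [slice_zero]
  dsimp only
  rw [hget]
  rw [PySem.List.pySetD_of_nonneg _ _ (by omega)]
  rw [PySem.List.pyGetD_zero]
  exact getD_set_zero W v hW

theorem B_memo_hit (word : String) (aw : List String) (memo : List (String × Int)) (v : Int)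
    (hget : (PySem.Dict.ofList memo).get? word = some v) :
    count_ways_to_form_word_alt word aw memo = v := by
  rw [alt_eq, str_len_eq, range_split, List.foldl_append]
  have hfold : ∀ W : List Int, List.foldl (bStep word aw (PySem.Dict.ofList memo)) W [0] =
      bStep word aw (PySem.Dict.ofList memo) W 0 := fun W => rfl
  rw [hfold]
  exact bStep_hit word aw _ _ v hget (by rw [bStep_length]; simp)

theorem B_empty (aw : List String) (memo : List (String × Int))
    (hget : (PySem.Dict.ofList memo).get? "" = none) :
    count_ways_to_form_word_alt "" aw memo = 1 := by
  rw [alt_eq]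
  have h0 : PySem.Str.len "" = 0 := by rw [str_len_eq]; rfl
  rw [h0]
  rw [PySem.List.pyRange_neg_one_cons (by omega), PySem.List.pyRange_neg_one_eq_nil (by omega)]
  have hfold : ∀ W : List Int, List.foldl (bStep "" aw (PySem.Dict.ofList memo)) W [0] =
      bStep "" aw (PySem.Dict.ofList memo) W 0 := fun W => rfl
  rw [hfold]
  unfold bStep
  rw [slice_zero]
  dsimp only
  rw [hget]
  simp only [h0]
  rfl

theorem A_unfold_once (word : String) (aw : List String) (memo : List (String × Int)) :
    count_ways_to_form_word word aw memo =
      (aGo aw (word.toList.length + 1) word (PySem.Dict.ofList memo)).1 := rfl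

-- ===== VERDICT (by name: the statement is the Claim_ definition above) =====
theorem count_ways_to_form_word_spec : Claim_equal_count_ways_to_form_word := by
  unfold Claim_equal_count_ways_to_form_word
  intro word aw memo _ hpre
  unfold Spec_count_ways_to_form_word
  cases hget : (PySem.Dict.ofList memo).get? word with
  | some v =>
    have hA : count_ways_to_form_word word aw memo = v := by
      rw [A_unfold_once]; simp only [aGo, hget]
    rw [hA, B_memo_hit word aw memo v hget]
  | none =>
    by_cases hw0 : word = ""
    · subst hw0
      have hA : count_ways_to_form_word "" aw memo = 1 := by
        rw [A_unfold_once]; simp [aGo, hget]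
      rw [hA, B_empty aw memo hget]
    · have haw : "" ∉ aw := by
        intro hmem
        rcases hpre hmem with h | h
        · exact hw0 h
        · rw [PySem.Dict.contains_eq_isSome_get?, hget] at h
          exact absurd h (by simp)
      have hInv0 : InvA aw (PySem.Dict.ofList memo) (PySem.Dict.ofList memo) :=
        ⟨fun s _ => rfl, fun s v hv => (FFs_memo aw (PySem.Dict.ofList memo) s v hv).symm⟩
      have hA := (A_main aw (PySem.Dict.ofList memo) haw (word.toList.length + 1) word
        (PySem.Dict.ofList memo) (by omega) hInv0).1
      rw [A_unfold_once, hA]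
      -- B side
      rw [alt_eq, str_len_eq]
      have hrange : ((word.toList.length : Nat) : Int) = ((word.toList.length + 1 : Nat) : Int) - 1 := by
        push_cast; ring
      rw [hrange]
      have hB := B_loop word aw (PySem.Dict.ofList memo) haw (word.toList.length + 1) (by omega)
        (List.replicate ((((word.toList.length + 1 : Nat) : Int) - 1).toNat + 1) 0)
        (by rw [List.length_replicate]; omega)
        (fun m hm1 hm2 => absurd (hm1.trans hm2) (by omega))
      rw [PySem.List.pyGetD_zero, hB.2 0 (by omega), sdrop_zero]
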